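-- pv_equiv track=rewrite | github.com/linzhi555/minijson | mjgen.py | _type_get_stmt
-- ===== SOURCE A (Python) =====
-- from typing import List, Tuple
--
-- c_int_types = ["int64_t",
--                "int",
--                "uint64_t",
--                "unsigned int",
--                "size_t",
--                "ssize_t",]
--
-- c_float_types = ["double","float"]
--
-- c_str_types = ["char*",]
--
-- c_bool_types = ["bool","_Bool"]
--
-- def _type_get_stmt(ctype: str, name: str) -> List[str] | None:
--     stmts: str = ''
--     if ctype in c_int_types:
--         stmts =  'int64_t {}_temp;\n'.format(name)
--         stmts += 'jmap_get_int(map, "{n}", &{n}_temp);\n'.format(n=name)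
--
--     elif ctype in c_float_types:
--         stmts =  'double {}_temp;\n'.format(name)
--         stmts += 'jmap_get_float(map, "{n}", &{n}_temp);\n'.format(n=name)
--
--     elif ctype in c_str_types:
--         stmts =  'char* {}_temp;\n'.format(name)
--         stmts += 'jmap_get_str(map, "{n}", &{n}_temp);\n'.format(n=name)
--
--
--     elif ctype in c_bool_types:
--         stmts =  'bool {}_temp;\n'.format(name)
--         stmts += 'jmap_get_bool(map, "{n}", &{n}_temp);\n'.format(n=name)
--
--     else:
--         return None
--
--     stmts += 'if (err != 0) return err;\n'
--     stmts += 'dst->{n} = ({t}) {n}_temp;'.format(t=ctype,n=name)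
--
--     ret = stmts.split('\n')
--     ret = ["    " + l for l in ret]
--     ret.append("")
--
--     return ret
-- ===== SOURCE B (Python) =====
-- # Emits the five final indented lines directly from one table lookup: no multi-line
-- # string is built, so A's split / indent-map / append post-processing disappears.
-- from typing import List, Tuple
--
-- _GETTERS = {
--     "int64_t": ("int64_t", "jmap_get_int"),
--     "int": ("int64_t", "jmap_get_int"),
--     "uint64_t": ("int64_t", "jmap_get_int"),
--     "unsigned int": ("int64_t", "jmap_get_int"),
--     "size_t": ("int64_t", "jmap_get_int"),
--     "ssize_t": ("int64_t", "jmap_get_int"),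
--     "double": ("double", "jmap_get_float"),
--     "float": ("double", "jmap_get_float"),
--     "char*": ("char*", "jmap_get_str"),
--     "bool": ("bool", "jmap_get_bool"),
--     "_Bool": ("bool", "jmap_get_bool"),
-- }
--
-- def _type_get_stmt(ctype: str, name: str) -> List[str] | None:
--     entry = _GETTERS.get(ctype)
--     if entry is None:
--         return None
--     t, getter = entry
--     return [
--         '    {} {}_temp;'.format(t, name),
--         '    {}(map, "{n}", &{n}_temp);'.format(getter, n=name),
--         '    if (err != 0) return err;',
--         '    dst->{n} = ({c}) {n}_temp;'.format(n=name, c=ctype),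
--         '',
--     ]
-- ===== Notes on version B (the rewrite author's own statement) =====
-- stated objective: simpler
-- what changed: B emits the five final, already-indented output lines directly (one table lookup picks temp type and getter), eliminating A's pipeline of building one newline-joined string, splitting it on '\n', indent-mapping every line and appending ''.
import Mathlib
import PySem

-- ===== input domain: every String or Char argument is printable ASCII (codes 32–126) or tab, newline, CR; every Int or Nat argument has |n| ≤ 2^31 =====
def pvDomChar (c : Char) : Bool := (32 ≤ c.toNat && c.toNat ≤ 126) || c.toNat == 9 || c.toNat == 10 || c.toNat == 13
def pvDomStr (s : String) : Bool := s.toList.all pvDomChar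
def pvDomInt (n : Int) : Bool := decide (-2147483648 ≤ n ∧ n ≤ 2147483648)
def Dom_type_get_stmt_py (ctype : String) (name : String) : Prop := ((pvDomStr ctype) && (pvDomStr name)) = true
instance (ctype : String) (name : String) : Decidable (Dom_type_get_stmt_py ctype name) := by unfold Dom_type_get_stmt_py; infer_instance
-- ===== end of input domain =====

-- B emits the five final indented output lines directly from one table lookup, eliminating A's
-- build-string / split('\n') / indent-map / append pipeline; return value proved equal on Pre_.


-- ===== PORT A =====
def c_int_types : List String := ["int64_t", "int", "uint64_t", "unsigned int", "size_t", "ssize_t"]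
def c_float_types : List String := ["double", "float"]
def c_str_types : List String := ["char*"]
def c_bool_types : List String := ["bool", "_Bool"]

def type_get_stmt_py (ctype : String) (name : String) : Option (List String) :=
  let stmts? : Option String :=
    if c_int_types.contains ctype then
      some (("int64_t " ++ name ++ "_temp;\n") ++
            ("jmap_get_int(map, \"" ++ name ++ "\", &" ++ name ++ "_temp);\n"))
    else if c_float_types.contains ctype then
      some (("double " ++ name ++ "_temp;\n") ++
            ("jmap_get_float(map, \"" ++ name ++ "\", &" ++ name ++ "_temp);\n"))
    else if c_str_types.contains ctype then
      some (("char* " ++ name ++ "_temp;\n") ++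
            ("jmap_get_str(map, \"" ++ name ++ "\", &" ++ name ++ "_temp);\n"))
    else if c_bool_types.contains ctype then
      some (("bool " ++ name ++ "_temp;\n") ++
            ("jmap_get_bool(map, \"" ++ name ++ "\", &" ++ name ++ "_temp);\n"))
    else none
  match stmts? with
  | none => none
  | some s0 =>
    let s1 := s0 ++ "if (err != 0) return err;\n"
    let s2 := s1 ++ ("dst->" ++ name ++ " = (" ++ ctype ++ ") " ++ name ++ "_temp;")
    -- .split('\n'): sep is the nonempty literal "\n", so split? is always `some`; getD [] is only a totality guard
    let ret := (PySem.Str.split? s2 "\n").getD []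
    let ret := ret.map (fun l => "    " ++ l)
    some (ret ++ [""])

-- ===== PORT B =====
def getterTable : PySem.Dict String (String × String) :=
  PySem.Dict.mk
    [("int64_t", ("int64_t", "jmap_get_int")),
     ("int", ("int64_t", "jmap_get_int")),
     ("uint64_t", ("int64_t", "jmap_get_int")),
     ("unsigned int", ("int64_t", "jmap_get_int")),
     ("size_t", ("int64_t", "jmap_get_int")),
     ("ssize_t", ("int64_t", "jmap_get_int")),
     ("double", ("double", "jmap_get_float")),
     ("float", ("double", "jmap_get_float")),
     ("char*", ("char*", "jmap_get_str")),
     ("bool", ("bool", "jmap_get_bool")),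
     ("_Bool", ("bool", "jmap_get_bool"))]

def type_get_stmt_py_alt (ctype : String) (name : String) : Option (List String) :=
  match PySem.Dict.get? getterTable ctype with
  | none => none
  | some (t, g) =>
    some ["    " ++ t ++ " " ++ name ++ "_temp;",
          "    " ++ g ++ "(map, \"" ++ name ++ "\", &" ++ name ++ "_temp);",
          "    if (err != 0) return err;",
          "    dst->" ++ name ++ " = (" ++ ctype ++ ") " ++ name ++ "_temp;",
          ""]

-- ===== PRECONDITION & SPEC =====
-- the eleven ctype strings A recognizes (a plain list; not a port helper)
def pvKnownCtypes : List String :=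
  ["int64_t", "int", "uint64_t", "unsigned int", "size_t", "ssize_t",
   "double", "float", "char*", "bool", "_Bool"]

-- Pre_ excludes only names containing a newline paired with a recognized ctype: there the generated
-- C is garbage either way and A's '\n'-split fragments the name across lines while B keeps it on one
-- line — an unspecified corner (names are C identifiers) where both values are equally defensible.
def Pre_type_get_stmt_py (ctype : String) (name : String) : Prop :=
  ctype ∉ pvKnownCtypes ∨ '\n' ∉ name.toList
instance (ctype : String) (name : String) : Decidable (Pre_type_get_stmt_py ctype name) := by unfold Pre_type_get_stmt_py; infer_instance

def pvWitness_type_get_stmt_py : String × String := ("int", "x")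

def Spec_type_get_stmt_py (ctype : String) (name : String) (out : Option (List String)) : Prop := out = type_get_stmt_py_alt ctype name
instance (ctype : String) (name : String) (out : Option (List String)) : Decidable (Spec_type_get_stmt_py ctype name out) := by unfold Spec_type_get_stmt_py; infer_instance

-- ===== CLAIM (what is proved, stated in full; the proofs are below) =====
def Claim_equal_type_get_stmt_py : Prop := ∀ (ctype : String) (name : String), Dom_type_get_stmt_py ctype name → Pre_type_get_stmt_py ctype name → Spec_type_get_stmt_py ctype name (type_get_stmt_py ctype name)

-- ===== LEMMAS AND PROOFS =====

-- Characterisation of PySem's str.split on a single-character separator: the fuel loop, stepped.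
theorem go_nil (c : Char) (fuel : Nat) (cur : List Char) (accs : List (List Char)) :
    PySem.Chars.splitOn.go [c] fuel [] cur accs = (cur.reverse :: accs).reverse := by
  cases fuel <;> simp [PySem.Chars.splitOn.go]

theorem go_cons_ne (c a : Char) (h : a ≠ c) (fuel : Nat) (rest cur : List Char) (accs : List (List Char)) :
    PySem.Chars.splitOn.go [c] (fuel+1) (a::rest) cur accs = PySem.Chars.splitOn.go [c] fuel rest (a::cur) accs := by
  simp [PySem.Chars.splitOn.go, List.isPrefixOf, Ne.symm h]

theorem go_cons_sep (c : Char) (fuel : Nat) (rest cur : List Char) (accs : List (List Char)) :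
    PySem.Chars.splitOn.go [c] (fuel+1) (c::rest) cur accs = PySem.Chars.splitOn.go [c] fuel rest [] (cur.reverse :: accs) := by
  simp [PySem.Chars.splitOn.go, List.isPrefixOf]

theorem go_skip (c : Char) (p : List Char) (hp : c ∉ p) (fuel : Nat) (l cur : List Char) (accs : List (List Char)) :
    PySem.Chars.splitOn.go [c] (p.length + fuel) (p ++ l) cur accs = PySem.Chars.splitOn.go [c] fuel l (p.reverse ++ cur) accs := by
  induction p generalizing cur with
  | nil => simp
  | cons a p ih =>
    have ha : a ≠ c := by rintro rfl; exact hp (List.mem_cons_self)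
    have hp' : c ∉ p := fun h => hp (List.mem_cons_of_mem _ h)
    have : (a :: p).length + fuel = (p.length + fuel) + 1 := by simp; omega
    rw [this, List.cons_append, go_cons_ne c a ha, ih hp']
    simp

-- splitting a string of exactly four sep-free pieces gives back the pieces
theorem split4 (c : Char) (p1 p2 p3 p4 : List Char)
    (h1 : c ∉ p1) (h2 : c ∉ p2) (h3 : c ∉ p3) (h4 : c ∉ p4) :
    PySem.Chars.splitOn (p1 ++ c :: (p2 ++ c :: (p3 ++ c :: p4))) [c] = [p1, p2, p3, p4] := by
  unfold PySem.Chars.splitOn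
  have hlen : (p1 ++ c :: (p2 ++ c :: (p3 ++ c :: p4))).length + 1
      = p1.length + (1 + (p2.length + (1 + (p3.length + (1 + (p4.length + 1)))))) := by
    simp; omega
  rw [hlen, go_skip c p1 h1, show (1 + (p2.length + (1 + (p3.length + (1 + (p4.length + 1)))))) = (p2.length + (1 + (p3.length + (1 + (p4.length + 1))))) + 1 from by omega,
      go_cons_sep, go_skip c p2 h2,
      show (1 + (p3.length + (1 + (p4.length + 1)))) = (p3.length + (1 + (p4.length + 1))) + 1 from by omega,
      go_cons_sep, go_skip c p3 h3,
      show (1 + (p4.length + 1)) = (p4.length + 1) + 1 from by omega,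
      go_cons_sep]
  have hlast := go_skip c p4 h4 1 [] [] [(p3.reverse ++ []).reverse, (p2.reverse ++ []).reverse, (p1.reverse ++ []).reverse]
  rw [go_nil] at hlast
  simp at hlast
  simpa using hlast

-- A's whole post-processing pipeline (split on '\n', indent each line, append "") evaluated on the
-- generic 4-line statement string, for any newline-free t / g / ctype / name
theorem pipeline (t g ctype name : String)
    (hn : '\n' ∉ name.toList) (ht : '\n' ∉ t.toList) (hg : '\n' ∉ g.toList) (hc : '\n' ∉ ctype.toList) :
    ((((PySem.Str.split? (t ++ " " ++ name ++ "_temp;\n" ++ g ++ "(map, \"" ++ name ++ "\", &" ++ name ++ "_temp);\n" ++ "if (err != 0) return err;\n" ++ "dst->" ++ name ++ " = (" ++ ctype ++ ") " ++ name ++ "_temp;") "\n").getD []).map (fun l => "    " ++ l)) ++ [""])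
    = ["    " ++ t ++ " " ++ name ++ "_temp;",
       "    " ++ g ++ "(map, \"" ++ name ++ "\", &" ++ name ++ "_temp);",
       "    if (err != 0) return err;",
       "    dst->" ++ name ++ " = (" ++ ctype ++ ") " ++ name ++ "_temp;", ""] := by
  have hs : (t ++ " " ++ name ++ "_temp;\n" ++ g ++ "(map, \"" ++ name ++ "\", &" ++ name ++ "_temp);\n" ++ "if (err != 0) return err;\n" ++ "dst->" ++ name ++ " = (" ++ ctype ++ ") " ++ name ++ "_temp;").toList
      = (t.toList ++ " ".toList ++ name.toList ++ "_temp;".toList) ++ '\n' ::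
        ((g.toList ++ "(map, \"".toList ++ name.toList ++ "\", &".toList ++ name.toList ++ "_temp);".toList) ++ '\n' ::
        ("if (err != 0) return err;".toList ++ '\n' ::
        ("dst->".toList ++ name.toList ++ " = (".toList ++ ctype.toList ++ ") ".toList ++ name.toList ++ "_temp;".toList))) := by
    simp
  have hsplit := split4 '\n'
      (t.toList ++ " ".toList ++ name.toList ++ "_temp;".toList)
      (g.toList ++ "(map, \"".toList ++ name.toList ++ "\", &".toList ++ name.toList ++ "_temp);".toList)
      ("if (err != 0) return err;".toList)
      ("dst->".toList ++ name.toList ++ " = (".toList ++ ctype.toList ++ ") ".toList ++ name.toList ++ "_temp;".toList)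
      (by simp [ht, hn]) (by simp [hg, hn]) (by decide) (by simp [hc, hn])
  simp only [PySem.Str.split?, PySem.Chars.split?, show ("\n" : String).toList = ['\n'] from rfl, List.isEmpty, hs, hsplit]
  simp [String.ext_iff]

-- ===== VERDICT (by name: the statement is the Claim_ definition above) =====
theorem type_get_stmt_py_spec : Claim_equal_type_get_stmt_py := by
  intro ctype name _ hpre
  unfold Spec_type_get_stmt_py type_get_stmt_py type_get_stmt_py_alt
  by_cases hk : ctype ∈ pvKnownCtypes
  case neg =>
    simp only [pvKnownCtypes, List.mem_cons, List.not_mem_nil, or_false, not_or] at hk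
    obtain ⟨n1, n2, n3, n4, n5, n6, n7, n8, n9, n10, n11⟩ := hk
    simp [c_int_types, c_float_types, c_str_types, c_bool_types, getterTable, PySem.Dict.get?,
      n1, n2, n3, n4, n5, n6, n7, n8, n9, n10, n11,
      Ne.symm n1, Ne.symm n2, Ne.symm n3, Ne.symm n4, Ne.symm n5, Ne.symm n6, Ne.symm n7,
      Ne.symm n8, Ne.symm n9, Ne.symm n10, Ne.symm n11]
  case pos =>
    have hn : '\n' ∉ name.toList := hpre.resolve_left (by simp [hk])
    simp only [pvKnownCtypes, List.mem_cons, List.not_mem_nil, or_false] at hk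
    rcases hk with rfl|rfl|rfl|rfl|rfl|rfl|rfl|rfl|rfl|rfl|rfl
    · simp only [show c_int_types.contains "int64_t" = true from rfl,
        show PySem.Dict.get? getterTable "int64_t" = some ("int64_t", "jmap_get_int") from rfl, if_true]
      exact (congrArg (fun s => some ((((PySem.Str.split? s "\n").getD []).map (fun l => "    " ++ l)) ++ [""]))
        (show (("int64_t " ++ name ++ "_temp;\n") ++ ("jmap_get_int(map, \"" ++ name ++ "\", &" ++ name ++ "_temp);\n")) ++ "if (err != 0) return err;\n" ++ ("dst->" ++ name ++ " = (" ++ "int64_t" ++ ") " ++ name ++ "_temp;")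
          = "int64_t" ++ " " ++ name ++ "_temp;\n" ++ "jmap_get_int" ++ "(map, \"" ++ name ++ "\", &" ++ name ++ "_temp);\n" ++ "if (err != 0) return err;\n" ++ "dst->" ++ name ++ " = (" ++ "int64_t" ++ ") " ++ name ++ "_temp;" from by
          apply String.toList_injective; simp)).trans
        (congrArg some (pipeline "int64_t" "jmap_get_int" "int64_t" name hn (by decide) (by decide) (by decide)))
    · simp only [show c_int_types.contains "int" = true from rfl,
        show PySem.Dict.get? getterTable "int" = some ("int64_t", "jmap_get_int") from rfl, if_true]
      exact (congrArg (fun s => some ((((PySem.Str.split? s "\n").getD []).map (fun l => "    " ++ l)) ++ [""]))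
        (show (("int64_t " ++ name ++ "_temp;\n") ++ ("jmap_get_int(map, \"" ++ name ++ "\", &" ++ name ++ "_temp);\n")) ++ "if (err != 0) return err;\n" ++ ("dst->" ++ name ++ " = (" ++ "int" ++ ") " ++ name ++ "_temp;")
          = "int64_t" ++ " " ++ name ++ "_temp;\n" ++ "jmap_get_int" ++ "(map, \"" ++ name ++ "\", &" ++ name ++ "_temp);\n" ++ "if (err != 0) return err;\n" ++ "dst->" ++ name ++ " = (" ++ "int" ++ ") " ++ name ++ "_temp;" from by
          apply String.toList_injective; simp)).trans
        (congrArg some (pipeline "int64_t" "jmap_get_int" "int" name hn (by decide) (by decide) (by decide)))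
    · simp only [show c_int_types.contains "uint64_t" = true from rfl,
        show PySem.Dict.get? getterTable "uint64_t" = some ("int64_t", "jmap_get_int") from rfl, if_true]
      exact (congrArg (fun s => some ((((PySem.Str.split? s "\n").getD []).map (fun l => "    " ++ l)) ++ [""]))
        (show (("int64_t " ++ name ++ "_temp;\n") ++ ("jmap_get_int(map, \"" ++ name ++ "\", &" ++ name ++ "_temp);\n")) ++ "if (err != 0) return err;\n" ++ ("dst->" ++ name ++ " = (" ++ "uint64_t" ++ ") " ++ name ++ "_temp;")
          = "int64_t" ++ " " ++ name ++ "_temp;\n" ++ "jmap_get_int" ++ "(map, \"" ++ name ++ "\", &" ++ name ++ "_temp);\n" ++ "if (err != 0) return err;\n" ++ "dst->" ++ name ++ " = (" ++ "uint64_t" ++ ") " ++ name ++ "_temp;" from by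
          apply String.toList_injective; simp)).trans
        (congrArg some (pipeline "int64_t" "jmap_get_int" "uint64_t" name hn (by decide) (by decide) (by decide)))
    · simp only [show c_int_types.contains "unsigned int" = true from rfl,
        show PySem.Dict.get? getterTable "unsigned int" = some ("int64_t", "jmap_get_int") from rfl, if_true]
      exact (congrArg (fun s => some ((((PySem.Str.split? s "\n").getD []).map (fun l => "    " ++ l)) ++ [""]))
        (show (("int64_t " ++ name ++ "_temp;\n") ++ ("jmap_get_int(map, \"" ++ name ++ "\", &" ++ name ++ "_temp);\n")) ++ "if (err != 0) return err;\n" ++ ("dst->" ++ name ++ " = (" ++ "unsigned int" ++ ") " ++ name ++ "_temp;")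
          = "int64_t" ++ " " ++ name ++ "_temp;\n" ++ "jmap_get_int" ++ "(map, \"" ++ name ++ "\", &" ++ name ++ "_temp);\n" ++ "if (err != 0) return err;\n" ++ "dst->" ++ name ++ " = (" ++ "unsigned int" ++ ") " ++ name ++ "_temp;" from by
          apply String.toList_injective; simp)).trans
        (congrArg some (pipeline "int64_t" "jmap_get_int" "unsigned int" name hn (by decide) (by decide) (by decide)))
    · simp only [show c_int_types.contains "size_t" = true from rfl,
        show PySem.Dict.get? getterTable "size_t" = some ("int64_t", "jmap_get_int") from rfl, if_true]
      exact (congrArg (fun s => some ((((PySem.Str.split? s "\n").getD []).map (fun l => "    " ++ l)) ++ [""]))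
        (show (("int64_t " ++ name ++ "_temp;\n") ++ ("jmap_get_int(map, \"" ++ name ++ "\", &" ++ name ++ "_temp);\n")) ++ "if (err != 0) return err;\n" ++ ("dst->" ++ name ++ " = (" ++ "size_t" ++ ") " ++ name ++ "_temp;")
          = "int64_t" ++ " " ++ name ++ "_temp;\n" ++ "jmap_get_int" ++ "(map, \"" ++ name ++ "\", &" ++ name ++ "_temp);\n" ++ "if (err != 0) return err;\n" ++ "dst->" ++ name ++ " = (" ++ "size_t" ++ ") " ++ name ++ "_temp;" from by
          apply String.toList_injective; simp)).trans
        (congrArg some (pipeline "int64_t" "jmap_get_int" "size_t" name hn (by decide) (by decide) (by decide)))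
    · simp only [show c_int_types.contains "ssize_t" = true from rfl,
        show PySem.Dict.get? getterTable "ssize_t" = some ("int64_t", "jmap_get_int") from rfl, if_true]
      exact (congrArg (fun s => some ((((PySem.Str.split? s "\n").getD []).map (fun l => "    " ++ l)) ++ [""]))
        (show (("int64_t " ++ name ++ "_temp;\n") ++ ("jmap_get_int(map, \"" ++ name ++ "\", &" ++ name ++ "_temp);\n")) ++ "if (err != 0) return err;\n" ++ ("dst->" ++ name ++ " = (" ++ "ssize_t" ++ ") " ++ name ++ "_temp;")
          = "int64_t" ++ " " ++ name ++ "_temp;\n" ++ "jmap_get_int" ++ "(map, \"" ++ name ++ "\", &" ++ name ++ "_temp);\n" ++ "if (err != 0) return err;\n" ++ "dst->" ++ name ++ " = (" ++ "ssize_t" ++ ") " ++ name ++ "_temp;" from by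
          apply String.toList_injective; simp)).trans
        (congrArg some (pipeline "int64_t" "jmap_get_int" "ssize_t" name hn (by decide) (by decide) (by decide)))
    · simp only [show c_int_types.contains "double" = false from rfl,
        show c_float_types.contains "double" = true from rfl,
        show PySem.Dict.get? getterTable "double" = some ("double", "jmap_get_float") from rfl, if_true]
      exact (congrArg (fun s => some ((((PySem.Str.split? s "\n").getD []).map (fun l => "    " ++ l)) ++ [""]))
        (show (("double " ++ name ++ "_temp;\n") ++ ("jmap_get_float(map, \"" ++ name ++ "\", &" ++ name ++ "_temp);\n")) ++ "if (err != 0) return err;\n" ++ ("dst->" ++ name ++ " = (" ++ "double" ++ ") " ++ name ++ "_temp;")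
          = "double" ++ " " ++ name ++ "_temp;\n" ++ "jmap_get_float" ++ "(map, \"" ++ name ++ "\", &" ++ name ++ "_temp);\n" ++ "if (err != 0) return err;\n" ++ "dst->" ++ name ++ " = (" ++ "double" ++ ") " ++ name ++ "_temp;" from by
          apply String.toList_injective; simp)).trans
        (congrArg some (pipeline "double" "jmap_get_float" "double" name hn (by decide) (by decide) (by decide)))
    · simp only [show c_int_types.contains "float" = false from rfl,
        show c_float_types.contains "float" = true from rfl,
        show PySem.Dict.get? getterTable "float" = some ("double", "jmap_get_float") from rfl, if_true]
      exact (congrArg (fun s => some ((((PySem.Str.split? s "\n").getD []).map (fun l => "    " ++ l)) ++ [""]))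
        (show (("double " ++ name ++ "_temp;\n") ++ ("jmap_get_float(map, \"" ++ name ++ "\", &" ++ name ++ "_temp);\n")) ++ "if (err != 0) return err;\n" ++ ("dst->" ++ name ++ " = (" ++ "float" ++ ") " ++ name ++ "_temp;")
          = "double" ++ " " ++ name ++ "_temp;\n" ++ "jmap_get_float" ++ "(map, \"" ++ name ++ "\", &" ++ name ++ "_temp);\n" ++ "if (err != 0) return err;\n" ++ "dst->" ++ name ++ " = (" ++ "float" ++ ") " ++ name ++ "_temp;" from by
          apply String.toList_injective; simp)).trans
        (congrArg some (pipeline "double" "jmap_get_float" "float" name hn (by decide) (by decide) (by decide)))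
    · simp only [show c_int_types.contains "char*" = false from rfl,
        show c_float_types.contains "char*" = false from rfl,
        show c_str_types.contains "char*" = true from rfl,
        show PySem.Dict.get? getterTable "char*" = some ("char*", "jmap_get_str") from rfl, if_true]
      exact (congrArg (fun s => some ((((PySem.Str.split? s "\n").getD []).map (fun l => "    " ++ l)) ++ [""]))
        (show (("char* " ++ name ++ "_temp;\n") ++ ("jmap_get_str(map, \"" ++ name ++ "\", &" ++ name ++ "_temp);\n")) ++ "if (err != 0) return err;\n" ++ ("dst->" ++ name ++ " = (" ++ "char*" ++ ") " ++ name ++ "_temp;")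
          = "char*" ++ " " ++ name ++ "_temp;\n" ++ "jmap_get_str" ++ "(map, \"" ++ name ++ "\", &" ++ name ++ "_temp);\n" ++ "if (err != 0) return err;\n" ++ "dst->" ++ name ++ " = (" ++ "char*" ++ ") " ++ name ++ "_temp;" from by
          apply String.toList_injective; simp)).trans
        (congrArg some (pipeline "char*" "jmap_get_str" "char*" name hn (by decide) (by decide) (by decide)))
    · simp only [show c_int_types.contains "bool" = false from rfl,
        show c_float_types.contains "bool" = false from rfl,
        show c_str_types.contains "bool" = false from rfl,
        show c_bool_types.contains "bool" = true from rfl,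
        show PySem.Dict.get? getterTable "bool" = some ("bool", "jmap_get_bool") from rfl, if_true]
      exact (congrArg (fun s => some ((((PySem.Str.split? s "\n").getD []).map (fun l => "    " ++ l)) ++ [""]))
        (show (("bool " ++ name ++ "_temp;\n") ++ ("jmap_get_bool(map, \"" ++ name ++ "\", &" ++ name ++ "_temp);\n")) ++ "if (err != 0) return err;\n" ++ ("dst->" ++ name ++ " = (" ++ "bool" ++ ") " ++ name ++ "_temp;")
          = "bool" ++ " " ++ name ++ "_temp;\n" ++ "jmap_get_bool" ++ "(map, \"" ++ name ++ "\", &" ++ name ++ "_temp);\n" ++ "if (err != 0) return err;\n" ++ "dst->" ++ name ++ " = (" ++ "bool" ++ ") " ++ name ++ "_temp;" from by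
          apply String.toList_injective; simp)).trans
        (congrArg some (pipeline "bool" "jmap_get_bool" "bool" name hn (by decide) (by decide) (by decide)))
    · simp only [show c_int_types.contains "_Bool" = false from rfl,
        show c_float_types.contains "_Bool" = false from rfl,
        show c_str_types.contains "_Bool" = false from rfl,
        show c_bool_types.contains "_Bool" = true from rfl,
        show PySem.Dict.get? getterTable "_Bool" = some ("bool", "jmap_get_bool") from rfl, if_true]
      exact (congrArg (fun s => some ((((PySem.Str.split? s "\n").getD []).map (fun l => "    " ++ l)) ++ [""]))
        (show (("bool " ++ name ++ "_temp;\n") ++ ("jmap_get_bool(map, \"" ++ name ++ "\", &" ++ name ++ "_temp);\n")) ++ "if (err != 0) return err;\n" ++ ("dst->" ++ name ++ " = (" ++ "_Bool" ++ ") " ++ name ++ "_temp;")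
          = "bool" ++ " " ++ name ++ "_temp;\n" ++ "jmap_get_bool" ++ "(map, \"" ++ name ++ "\", &" ++ name ++ "_temp);\n" ++ "if (err != 0) return err;\n" ++ "dst->" ++ name ++ " = (" ++ "_Bool" ++ ") " ++ name ++ "_temp;" from by
          apply String.toList_injective; simp)).trans
        (congrArg some (pipeline "bool" "jmap_get_bool" "_Bool" name hn (by decide) (by decide) (by decide)))
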